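-- pv_equiv track=rewrite | github.com/yihui504/SBMF | core/three_valued_logic.py | compute_overall_passed
-- ===== SOURCE A (Python) =====
-- from typing import List, Optional
--
-- def compute_overall_passed(results: List[Optional[bool]]) -> Optional[bool]:
--     """
--     Compute overall evaluation result from a list of results.
--
--     Rules:
--     1. False + anything → False
--     2. True + None → True
--     3. All None → None (not evaluable)
--
--     None is not implicitly treated as True or False.
--
--     Args:
--         results: List of boolean results or None
--
--     Returns:
--         Overall result: True, False, or None
--     """
--     if not results:
--         return None
--
--     # Rule 1: False + anything → False
--     if any(r is False for r in results):
--         return False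
--
--     # Check for explicit True and None values
--     has_true = any(r is True for r in results)
--     has_none = any(r is None for r in results)
--
--     # Rule 2: True + None → True
--     if has_true and has_none:
--         return True
--
--     # Rule 3: All None → None
--     if has_none and not has_true:
--         return None
--
--     # All True
--     if has_true and not has_none:
--         return True
--
--     return None
-- ===== SOURCE B (Python) =====
-- from typing import List, Optional
--
-- def compute_overall_passed(results: List[Optional[bool]]) -> Optional[bool]:
--     has_true = False
--     for r in results:
--         if r is False:
--             return False
--         if r is True:
--             has_true = True
--     return True if has_true else None
-- ===== Notes on version B (the rewrite author's own statement) =====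
-- stated objective: simpler
-- what changed: Replaces three separate any() scans plus a four-way flag case analysis with one short-circuiting pass that returns False on the first False and otherwise tracks a single has_true flag (empty list falls out as None).
import Mathlib
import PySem

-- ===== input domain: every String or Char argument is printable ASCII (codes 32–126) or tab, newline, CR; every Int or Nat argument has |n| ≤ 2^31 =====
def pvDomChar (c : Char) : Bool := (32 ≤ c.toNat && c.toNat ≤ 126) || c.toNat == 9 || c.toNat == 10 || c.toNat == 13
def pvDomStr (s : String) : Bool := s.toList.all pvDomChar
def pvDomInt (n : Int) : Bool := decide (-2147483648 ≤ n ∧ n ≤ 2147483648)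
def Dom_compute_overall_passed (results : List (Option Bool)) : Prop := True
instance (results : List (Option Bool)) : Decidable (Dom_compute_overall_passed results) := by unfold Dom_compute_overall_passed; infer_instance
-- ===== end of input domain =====

-- B replaces A's three any() scans and flag case analysis with one short-circuiting pass (objective: simpler).
-- ===== PORT A =====
def compute_overall_passed (results : List (Option Bool)) : Option Bool :=
  if results.isEmpty then none
  else if results.any (fun r => r == some false) then some false
  else
    let has_true := results.any (fun r => r == some true)
    let has_none := results.any (fun r => r == none)
    if has_true && has_none then some true
    else if has_none && !has_true then none
    else if has_true && !has_none then some true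
    else none

-- ===== PORT B =====
def compute_overall_passed_altGo (has_true : Bool) : List (Option Bool) → Option Bool
  | [] => if has_true then some true else none
  | r :: rest =>
    if r == some false then some false
    else if r == some true then compute_overall_passed_altGo true rest
    else compute_overall_passed_altGo has_true rest

def compute_overall_passed_alt (results : List (Option Bool)) : Option Bool :=
  compute_overall_passed_altGo false results

-- ===== PRECONDITION & SPEC =====
def Spec_compute_overall_passed (results : List (Option Bool)) (out : Option Bool) : Prop := out = compute_overall_passed_alt results
instance (results : List (Option Bool)) (out : Option Bool) : Decidable (Spec_compute_overall_passed results out) := by unfold Spec_compute_overall_passed; infer_instance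

-- ===== CLAIM (what is proved, stated in full; the proofs are below) =====
def Claim_equal_compute_overall_passed : Prop := ∀ (results : List (Option Bool)), Dom_compute_overall_passed results → Spec_compute_overall_passed results (compute_overall_passed results)

-- ===== LEMMAS AND PROOFS =====

-- ===== VERDICT (by name: the statement is the Claim_ definition above) =====
theorem go_characterize (has_true : Bool) (l : List (Option Bool)) :
    compute_overall_passed_altGo has_true l =
      if l.any (fun r => r == some false) then some false
      else if has_true || l.any (fun r => r == some true) then some true
      else none := by
  induction l generalizing has_true with
  | nil => simp [compute_overall_passed_altGo]
  | cons r rest ih =>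
    match r with
    | some false => simp [compute_overall_passed_altGo]
    | some true => simp [compute_overall_passed_altGo, ih]
    | none => simp [compute_overall_passed_altGo, ih]

theorem compute_overall_passed_spec : Claim_equal_compute_overall_passed := by
  intro results _
  unfold Spec_compute_overall_passed
  rw [compute_overall_passed_alt, go_characterize]
  unfold compute_overall_passed
  match results with
  | [] => simp
  | r :: rest =>
    simp only [List.isEmpty_cons, if_neg Bool.false_ne_true, Bool.false_or]
    by_cases hf : (r :: rest).any (fun x => x == some false)
    · simp [hf]
    · simp only [hf, if_neg (by simp [hf] : ¬((r :: rest).any (fun x => x == some false) = true))]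
      by_cases ht : (r :: rest).any (fun x => x == some true) <;>
        by_cases hn : (r :: rest).any (fun x => x == none) <;>
          simp [ht, hn] <;>
            exact fun h1 h2 => ⟨Option.isSome_iff_ne_none.mpr h1, h2⟩
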